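-- pv_equiv track=rewrite | github.com/hsnkch/Algorithm | Programmers/level 2/리코쳇 로봇.py | solution
-- ===== SOURCE A (Python) =====
-- from collections import deque
--
-- def solution(board):
--     answer = -1
--     q = deque()
--     dir = ((1,0),(-1,0),(0,1),(0,-1))
--     visited = [[0 for _ in range(len(board[0]))] for _ in range(len(board))]
--
--     for i in range(len(board)):
--         for j in range(len(board[i])):
--             if board[i][j] == 'R':
--                 q.append((i,j))
--                 visited[i][j] = 1
--
--     while q:
--         x, y = q.popleft()
--         if board[x][y] == 'G':
--             answer = visited[x][y]-1
--
--         for dx, dy in dir: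
--             now_x, now_y = x, y
--             while True:
--                 now_x += dx
--                 now_y += dy
--                 if 0<=now_x<len(board) and 0<=now_y<len(board[0]) and board[now_x][now_y] == 'D':
--                     now_x -= dx
--                     now_y -= dy
--                     break
--                 if now_x<0 or now_x>=len(board) or now_y<0 or now_y>=len(board[0]):
--                         now_x -= dx
--                         now_y -= dy
--                         break
--
--             if not visited[now_x][now_y]:
--                 visited[now_x][now_y] = visited[x][y] + 1
--                 q.append((now_x, now_y))
--
--     return answer
-- ===== SOURCE B (Python) =====
-- def solution(board):
--     n, m = len(board), len(board[0])
--
--     def targets(x, y):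
--         out = []
--         for dx, dy in ((1, 0), (-1, 0), (0, 1), (0, -1)):
--             cx, cy = x, y
--             while 0 <= cx + dx < n and 0 <= cy + dy < m and board[cx + dx][cy + dy] != 'D':
--                 cx += dx
--                 cy += dy
--             out.append((cx, cy))
--         return out
--
--     # iterated closure: S_k = cells reachable in at most k slides; stop at fixpoint
--     S = {(i, j) for i in range(n) for j in range(len(board[i])) if board[i][j] == 'R'}
--     k = 0
--     while True:
--         if any(board[x][y] == 'G' for x, y in S):
--             return k
--         new = {t for c in S for t in targets(*c)} - S
--         if not new:
--             return -1
--         S |= new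
--         k += 1
-- ===== Notes on version B (the rewrite author's own statement) =====
-- stated objective: alternative
-- what changed: Replaces the deque-based BFS that stores distances in a parallel visited grid by an iterated reachability closure: each round recomputes the slide targets of the WHOLE reachable set, adds the fresh ones, returns the round counter when a goal cell appears in the set, and -1 when the set reaches a fixpoint; no queue and no per-cell distance bookkeeping.
-- outside the precondition, e.g. on solution(['R..', '.']): A raises IndexError, B raises IndexError; on solution(['RG', '.G']): A returns 2, B returns 1
import Mathlib
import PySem

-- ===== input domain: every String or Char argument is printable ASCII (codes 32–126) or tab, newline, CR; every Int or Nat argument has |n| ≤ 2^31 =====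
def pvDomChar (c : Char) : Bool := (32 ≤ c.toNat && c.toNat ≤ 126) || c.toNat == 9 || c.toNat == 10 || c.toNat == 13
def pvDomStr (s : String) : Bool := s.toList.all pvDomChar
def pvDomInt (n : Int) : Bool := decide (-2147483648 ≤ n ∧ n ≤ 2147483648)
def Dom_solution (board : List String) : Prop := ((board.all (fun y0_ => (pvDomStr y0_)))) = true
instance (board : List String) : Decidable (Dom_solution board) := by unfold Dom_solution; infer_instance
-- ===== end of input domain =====

-- B replaces A's queue-based BFS (deque + per-cell distance grid) by an iterated closure:
-- grow the set of reachable cells round by round, recomputing the slide targets of the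
-- whole set each round, until a goal cell appears or a fixpoint is reached; equal on Pre_.

-- board[x][y]; exact for the bounds-guarded reads both Pythons perform (0 ≤ x < rows, 0 ≤ y < width)
def cellAt (board : List String) (x y : Int) : Char :=
  ((board.getD x.toNat "").toList).getD y.toNat ' '

-- ===== PORT A =====
-- visited[a][b] = val  (functional update of the grid)
def updV (v : Int → Int → Int) (a b val : Int) : Int → Int → Int :=
  fun i j => if i = a ∧ j = b then val else v i j

def dirsList : List (Int × Int) := [(1, 0), (-1, 0), (0, 1), (0, -1)]

-- A's inner `while True` slide; fuel n+m+2 bounds the walk (it moves one cell per step inside the grid)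
def slideA (board : List String) (n m dx dy : Int) : Int → Int → Nat → Int × Int
  | x, y, 0 => (x, y)
  | x, y, fuel + 1 =>
    let nx := x + dx
    let ny := y + dy
    if 0 ≤ nx ∧ nx < n ∧ 0 ≤ ny ∧ ny < m ∧ cellAt board nx ny = 'D' then (x, y)
    else if nx < 0 ∨ n ≤ nx ∨ ny < 0 ∨ m ≤ ny then (x, y)
    else slideA board n m dx dy nx ny fuel

-- one direction of A's `for dx, dy in dir:` body
def expStepA (board : List String) (n m x y : Int)
    (acc : List (Int × Int) × (Int → Int → Int)) (d : Int × Int) :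
    List (Int × Int) × (Int → Int → Int) :=
  let p := slideA board n m d.1 d.2 x y (n.toNat + m.toNat + 2)
  if acc.2 p.1 p.2 = 0 then (acc.1 ++ [p], updV acc.2 p.1 p.2 (acc.2 x y + 1)) else acc

def expandA (board : List String) (n m x y : Int)
    (st : List (Int × Int) × (Int → Int → Int)) : List (Int × Int) × (Int → Int → Int) :=
  dirsList.foldl (expStepA board n m x y) st

-- A's `while q:`; fuel n*m+1 bounds the pops (every queued cell is a distinct visited cell)
def loopA (board : List String) (n m : Int) :
    Nat → List (Int × Int) → (Int → Int → Int) → Int → Int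
  | 0, _, _, ans => ans
  | fuel + 1, q, vis, ans =>
    match q with
    | [] => ans
    | c :: rest =>
      let ans' := if cellAt board c.1 c.2 = 'G' then vis c.1 c.2 - 1 else ans
      let st := expandA board n m c.1 c.2 (rest, vis)
      loopA board n m fuel st.1 st.2 ans'

-- the 'R' cells in row-major order (A's double start loop; also B's set comprehension)
def startCells (board : List String) : List (Int × Int) :=
  (List.range board.length).flatMap (fun i =>
    (List.range (board.getD i "").toList.length).filterMap (fun j =>
      if (board.getD i "").toList.getD j ' ' = 'R' then some ((i : Int), (j : Int)) else none))

def solution (board : List String) : Int :=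
  let n : Int := board.length
  let m : Int := (board.headD "").toList.length   -- len(board[0]); Pre_ gives board ≠ []
  let starts := startCells board
  let vis0 := starts.foldl (fun v c => updV v c.1 c.2 1) (fun _ _ => (0 : Int))
  loopA board n m (n.toNat * m.toNat + 1) starts vis0 (-1)

-- ===== PORT B =====
-- B's `targets` helper: for each direction slide while the next cell is inside and not 'D'
def slideB (board : List String) (n m : Int) : Int → Int → Int → Int → Nat → Int × Int
  | x, y, _, _, 0 => (x, y)
  | x, y, dx, dy, fuel + 1 =>
    if 0 ≤ x + dx ∧ x + dx < n ∧ 0 ≤ y + dy ∧ y + dy < m ∧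
        cellAt board (x + dx) (y + dy) ≠ 'D' then
      slideB board n m (x + dx) (y + dy) dx dy fuel
    else (x, y)

def targetsB (board : List String) (n m x y : Int) : List (Int × Int) :=
  dirsList.map (fun d => slideB board n m x y d.1 d.2 (n.toNat + m.toNat + 2))

-- B's `while True` closure loop: check for 'G' in S, add all fresh slide targets of the
-- WHOLE set, stop at fixpoint; fuel n*m+2 bounds the rounds (each round adds a fresh cell)
def roundsB (board : List String) (n m : Int) :
    Nat → PySem.Set (Int × Int) → Int → Int
  | 0, _, _ => -1
  | fuel + 1, S, k =>
    if S.any (fun c => cellAt board c.1 c.2 == 'G') then k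
    else
      let new : PySem.Set (Int × Int) :=
        PySem.Set.diff
          (PySem.Set.ofList (S.flatMap (fun c => targetsB board n m c.1 c.2))) S
      if new = [] then -1
      else roundsB board n m fuel (PySem.Set.union S new) (k + 1)

def solution_alt (board : List String) : Int :=
  let n : Int := board.length
  let m : Int := (board.headD "").toList.length
  roundsB board n m (n.toNat * m.toNat + 2) (PySem.Set.ofList (startCells board)) 0

-- ===== PRECONDITION & SPEC =====
-- Pre_ excludes the empty board and, unless the board has no 'R' at all (then both trivially
-- return -1), ragged boards (A indexes every row by len(board[0]) and can raise IndexError)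
-- and boards with more than one 'G', where A's answer is the depth of the LAST popped goal
-- while B returns the first level containing a goal — an accidental corner no caller of
-- this grid puzzle specifies.
def Pre_solution (board : List String) : Prop :=
  board ≠ [] ∧
    ((∀ r ∈ board, r.toList.length = (board.headD "").toList.length) ∧
        (board.map (fun r => r.toList.count 'G')).sum ≤ 1
      ∨ ∀ r ∈ board, 'R' ∉ r.toList)

instance (board : List String) : Decidable (Pre_solution board) := by
  unfold Pre_solution; infer_instance

def pvWitness_solution : List String := ["R.G"]

def Spec_solution (board : List String) (out : Int) : Prop := out = solution_alt board
instance (board : List String) (out : Int) : Decidable (Spec_solution board out) := by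
  unfold Spec_solution; infer_instance

-- ===== CLAIM (what is proved, stated in full; the proofs are below) =====
def Claim_equal_solution : Prop :=
  ∀ (board : List String), Dom_solution board → Pre_solution board →
    Spec_solution board (solution board)

-- ===== LEMMAS AND PROOFS =====

-- in-bounds cells of the n×m grid
def Inb (n m : Int) (c : Int × Int) : Prop := 0 ≤ c.1 ∧ c.1 < n ∧ 0 ≤ c.2 ∧ c.2 < m

-- the slide target of cell (x,y) in direction d, as A computes it
def tgtA (board : List String) (n m x y : Int) (d : Int × Int) : Int × Int :=
  slideA board n m d.1 d.2 x y (n.toNat + m.toNat + 2)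

-- all four slide targets of a cell (A's order)
def targetsOf (board : List String) (n m : Int) (c : Int × Int) : List (Int × Int) :=
  dirsList.map (tgtA board n m c.1 c.2)

-- number of in-bounds cells not yet visited (proof-side measure)
def unvis (n m : Int) (vis : Int → Int → Int) : Nat :=
  (((Finset.range n.toNat) ×ˢ (Finset.range m.toNat)).filter
    (fun p => vis (p.1 : Int) (p.2 : Int) = 0)).card

theorem slide_eq (board : List String) (n m : Int) :
    ∀ (fuel : Nat) (x y dx dy : Int),
      slideA board n m dx dy x y fuel = slideB board n m x y dx dy fuel := by
  intro fuel
  induction fuel with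
  | zero => intro x y dx dy; rfl
  | succ f ih =>
    intro x y dx dy
    simp only [slideA, slideB]
    by_cases hin : 0 ≤ x + dx ∧ x + dx < n ∧ 0 ≤ y + dy ∧ y + dy < m
    · by_cases hd : cellAt board (x + dx) (y + dy) = 'D'
      · rw [if_pos ⟨hin.1, hin.2.1, hin.2.2.1, hin.2.2.2, hd⟩,
          if_neg (fun h => h.2.2.2.2 hd)]
      · rw [if_neg (fun h => hd h.2.2.2.2), if_neg (by omega),
          if_pos ⟨hin.1, hin.2.1, hin.2.2.1, hin.2.2.2, hd⟩]
        exact ih _ _ _ _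
    · rw [if_neg (fun h => hin ⟨h.1, h.2.1, h.2.2.1, h.2.2.2.1⟩), if_pos (by omega),
        if_neg (fun h => hin ⟨h.1, h.2.1, h.2.2.1, h.2.2.2.1⟩)]

theorem targetsB_eq (board : List String) (n m x y : Int) :
    targetsB board n m x y = targetsOf board n m (x, y) := by
  simp only [targetsB, targetsOf]
  exact List.map_congr_left (fun d _ => (slide_eq board n m _ x y d.1 d.2).symm)

theorem slideA_inb (board : List String) (n m : Int) :
    ∀ (fuel : Nat) (x y dx dy : Int), Inb n m (x, y) →
      Inb n m (slideA board n m dx dy x y fuel) := by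
  intro fuel
  induction fuel with
  | zero => intro x y dx dy h; exact h
  | succ f ih =>
    intro x y dx dy h
    simp only [slideA]
    by_cases h1 : 0 ≤ x + dx ∧ x + dx < n ∧ 0 ≤ y + dy ∧ y + dy < m ∧
        cellAt board (x + dx) (y + dy) = 'D'
    · rw [if_pos h1]; exact h
    · rw [if_neg h1]
      by_cases h2 : x + dx < 0 ∨ n ≤ x + dx ∨ y + dy < 0 ∨ m ≤ y + dy
      · rw [if_pos h2]; exact h
      · rw [if_neg h2]
        exact ih _ _ _ _ ⟨by omega, by omega, by omega, by omega⟩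

theorem unvis_upd (n m : Int) (vis : Int → Int → Int) (a b v : Int)
    (hin : Inb n m (a, b)) (h0 : vis a b = 0) (hv : v ≠ 0) :
    unvis n m (updV vis a b v) + 1 = unvis n m vis := by
  obtain ⟨ha0, han, hb0, hbm⟩ := hin
  simp only at ha0 han hb0 hbm
  have hmem : (a.toNat, b.toNat) ∈
      ((Finset.range n.toNat ×ˢ Finset.range m.toNat).filter
        (fun p => vis (p.1 : Int) (p.2 : Int) = 0)) := by
    simp [Finset.mem_filter, Finset.mem_product]
    refine ⟨⟨by omega, by omega⟩, ?_⟩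
    have e1 : ((a.toNat : Int)) = a := by omega
    have e2 : ((b.toNat : Int)) = b := by omega
    simp only [e1, e2] at *
    convert h0 using 2 <;> omega
  have hset : ((Finset.range n.toNat ×ˢ Finset.range m.toNat).filter
        (fun p => updV vis a b v (p.1 : Int) (p.2 : Int) = 0)) =
      ((Finset.range n.toNat ×ˢ Finset.range m.toNat).filter
        (fun p => vis (p.1 : Int) (p.2 : Int) = 0)).erase (a.toNat, b.toNat) := by
    ext p
    simp only [Finset.mem_filter, Finset.mem_erase, updV]
    constructor
    · rintro ⟨hp, hval⟩
      by_cases h : (p.1 : Int) = a ∧ (p.2 : Int) = b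
      · rw [if_pos h] at hval; exact absurd hval hv
      · rw [if_neg h] at hval
        refine ⟨?_, hp, hval⟩
        intro he
        apply h
        constructor
        · rw [he]; simp; omega
        · rw [he]; simp; omega
    · rintro ⟨hne, hp, hval⟩
      refine ⟨hp, ?_⟩
      rw [if_neg ?_]
      · exact hval
      · rintro ⟨h1, h2⟩
        apply hne
        have : p = (p.1, p.2) := rfl
        rw [this]
        have e1 : p.1 = a.toNat := by omega
        have e2 : p.2 = b.toNat := by omega
        rw [e1, e2]
  unfold unvis
  rw [hset, Finset.card_erase_of_mem hmem,
    Nat.sub_add_cancel (Nat.one_le_iff_ne_zero.mpr (Finset.card_ne_zero_of_mem hmem))]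

theorem loopA_nil (board : List String) (n m : Int) (fuel : Nat)
    (vis : Int → Int → Int) (ans : Int) :
    loopA board n m fuel [] vis ans = ans := by
  cases fuel <;> simp [loopA]

-- full description of A's expansion fold over the directions: the freshly enqueued
-- cells Δ, preservation off Δ, and that EVERY slide target ends up visited
theorem exp_full (board : List String) (n m x y : Int) (hx : Inb n m (x, y)) :
    ∀ (ds q : List (Int × Int)) (vis : Int → Int → Int),
      vis x y ≠ 0 → (∀ a b : Int, 0 ≤ vis a b) →
      ∃ Δ : List (Int × Int),
        (ds.foldl (expStepA board n m x y) (q, vis)).1 = q ++ Δ ∧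
        Δ.Nodup ∧
        (∀ d ∈ Δ, Inb n m d ∧ vis d.1 d.2 = 0 ∧
          (ds.foldl (expStepA board n m x y) (q, vis)).2 d.1 d.2 = vis x y + 1 ∧
          d ∈ ds.map (tgtA board n m x y)) ∧
        (∀ c : Int × Int, c ∉ Δ →
          (ds.foldl (expStepA board n m x y) (q, vis)).2 c.1 c.2 = vis c.1 c.2) ∧
        (∀ t ∈ ds.map (tgtA board n m x y),
          (ds.foldl (expStepA board n m x y) (q, vis)).2 t.1 t.2 ≠ 0) ∧
        (∀ a b : Int, 0 ≤ (ds.foldl (expStepA board n m x y) (q, vis)).2 a b) ∧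
        unvis n m (ds.foldl (expStepA board n m x y) (q, vis)).2 + Δ.length =
          unvis n m vis := by
  intro ds
  induction ds with
  | nil =>
    intro q vis hxy hpos
    exact ⟨[], by simp, by simp, by simp, fun c _ => rfl, by simp, hpos, by simp⟩
  | cons d rest ih =>
    intro q vis hxy hpos
    rw [List.foldl_cons]
    simp only [expStepA]
    set p := slideA board n m d.1 d.2 x y (n.toNat + m.toNat + 2) with hp
    have hpt : p = tgtA board n m x y d := rfl
    have hpin : Inb n m p := by
      rw [hp]; exact slideA_inb board n m _ x y d.1 d.2 hx
    by_cases h0 : vis p.1 p.2 = 0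
    · rw [if_pos h0]
      have hxyne : ¬(x = p.1 ∧ y = p.2) := by
        rintro ⟨e1, e2⟩; rw [e1, e2] at hxy; exact hxy h0
      have hval : vis x y + 1 ≠ 0 := by have := hpos x y; omega
      have hv1xy : updV vis p.1 p.2 (vis x y + 1) x y = vis x y := by
        unfold updV; rw [if_neg hxyne]
      have hv1p : updV vis p.1 p.2 (vis x y + 1) p.1 p.2 = vis x y + 1 := by
        unfold updV; rw [if_pos ⟨rfl, rfl⟩]
      have hv1off : ∀ c : Int × Int, c ≠ p →
          updV vis p.1 p.2 (vis x y + 1) c.1 c.2 = vis c.1 c.2 := by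
        intro c hc
        unfold updV
        rw [if_neg (by rintro ⟨e1, e2⟩; exact hc (Prod.ext e1 e2))]
      have hpos1 : ∀ a b : Int, 0 ≤ updV vis p.1 p.2 (vis x y + 1) a b := by
        intro a b; unfold updV; split_ifs
        · have := hpos x y; omega
        · exact hpos a b
      obtain ⟨Δ', hA, hnd, hmem, hoff, hcov, hposF, hunv⟩ :=
        ih (q ++ [p]) (updV vis p.1 p.2 (vis x y + 1)) (by rw [hv1xy]; exact hxy) hpos1
      have hpnΔ : p ∉ Δ' := by
        intro hpd
        have h2 := (hmem p hpd).2.1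
        rw [hv1p] at h2
        exact hval h2
      refine ⟨p :: Δ', by rw [hA]; simp, List.nodup_cons.mpr ⟨hpnΔ, hnd⟩, ?_, ?_, ?_,
        hposF, ?_⟩
      · intro e he
        rcases List.mem_cons.mp he with rfl | he'
        · refine ⟨hpin, h0, ?_, by rw [hpt]; exact List.mem_map_of_mem (List.mem_cons_self ..)⟩
          rw [hoff p hpnΔ, hv1p]
        · obtain ⟨hin', hz', hval', hmm'⟩ := hmem e he'
          have hep : e ≠ p := by
            intro he2
            rw [he2, hv1p] at hz'; exact hval hz'
          refine ⟨hin', by rw [← hv1off e hep]; exact hz', by rw [hval', hv1xy], ?_⟩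
          rw [List.map_cons]
          exact List.mem_cons_of_mem _ hmm'
      · intro c hc
        have hcp : c ≠ p := fun h => hc (by rw [h]; exact List.mem_cons_self ..)
        have hcΔ : c ∉ Δ' := fun h => hc (List.mem_cons_of_mem _ h)
        rw [hoff c hcΔ, hv1off c hcp]
      · intro t ht
        rw [List.map_cons] at ht
        rcases List.mem_cons.mp ht with rfl | ht'
        · rw [← hpt, hoff p hpnΔ, hv1p]; exact hval
        · exact hcov t ht'
      · have huv : unvis n m (updV vis p.1 p.2 (vis x y + 1)) + 1 = unvis n m vis :=
          unvis_upd n m vis p.1 p.2 _ hpin h0 hval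
        rw [List.length_cons]; omega
    · rw [if_neg h0]
      obtain ⟨Δ', hA, hnd, hmem, hoff, hcov, hposF, hunv⟩ := ih q vis hxy hpos
      refine ⟨Δ', hA, hnd, ?_, hoff, ?_, hposF, hunv⟩
      · intro e he
        obtain ⟨h1, h2, h3, h4⟩ := hmem e he
        exact ⟨h1, h2, h3, by rw [List.map_cons]; exact List.mem_cons_of_mem _ h4⟩
      · intro t ht
        rw [List.map_cons] at ht
        rcases List.mem_cons.mp ht with rfl | ht'
        · have hpΔ : p ∉ Δ' := fun h => h0 (hmem p h).2.1
          rw [← hpt, hoff p hpΔ]; exact h0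
        · exact hcov t ht'

-- once every goal cell is visited and no goal is queued, A's flood never changes `ans`
theorem loopA_const (board : List String) (n m : Int) :
    ∀ (fuel : Nat) (q : List (Int × Int)) (vis : Int → Int → Int) (ans : Int),
      (∀ c ∈ q, Inb n m c ∧ cellAt board c.1 c.2 ≠ 'G' ∧ vis c.1 c.2 ≠ 0) →
      (∀ a b : Int, 0 ≤ vis a b) →
      (∀ c : Int × Int, Inb n m c → cellAt board c.1 c.2 = 'G' → vis c.1 c.2 ≠ 0) →
      loopA board n m fuel q vis ans = ans := by
  intro fuel
  induction fuel with
  | zero => intro q vis ans hq hpos hG; simp [loopA]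
  | succ f ih =>
    intro q vis ans hq hpos hG
    match q with
    | [] => simp [loopA]
    | c :: rest =>
      obtain ⟨hcin, hcng, hcnz⟩ := hq c (List.mem_cons_self ..)
      obtain ⟨Δ, hA, hnd, hmem, hoff, hcov, hposF, hunv⟩ :=
        exp_full board n m c.1 c.2 hcin dirsList rest vis hcnz hpos
      simp only [loopA, expandA]
      rw [if_neg hcng, hA]
      apply ih
      · intro e he
        rcases List.mem_append.mp he with he' | he'
        · obtain ⟨hi, hg, hz⟩ := hq e (List.mem_cons_of_mem _ he')
          have heΔ : e ∉ Δ := fun h => hz (hmem e h).2.1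
          exact ⟨hi, hg, by rw [hoff e heΔ]; exact hz⟩
        · obtain ⟨hi, hz0, hval, _⟩ := hmem e he'
          refine ⟨hi, ?_, by rw [hval]; have := hpos c.1 c.2; omega⟩
          intro hgg
          exact (hG e hi hgg) hz0
      · exact hposF
      · intro e hi hgg
        have hz := hG e hi hgg
        have heΔ : e ∉ Δ := fun h => hz (hmem e h).2.1
        rw [hoff e heΔ]; exact hz

-- if the (unique) goal is in the current wave, A returns `steps`
theorem loopA_goal (board : List String) (n m : Int)
    (huniq : ∀ c c' : Int × Int, Inb n m c → Inb n m c' →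
      cellAt board c.1 c.2 = 'G' → cellAt board c'.1 c'.2 = 'G' → c = c') :
    ∀ (wave nxt : List (Int × Int)) (vis : Int → Int → Int) (steps : Int)
      (fA : Nat) (ans : Int),
      (∀ c ∈ wave, Inb n m c ∧ vis c.1 c.2 = steps + 1) →
      (∀ c ∈ nxt, Inb n m c ∧ vis c.1 c.2 = steps + 2) →
      (wave ++ nxt).Nodup →
      (∀ a b : Int, 0 ≤ vis a b) →
      (∃ g ∈ wave, cellAt board g.1 g.2 = 'G') →
      0 ≤ steps →
      wave.length + nxt.length + unvis n m vis ≤ fA →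
      loopA board n m fA (wave ++ nxt) vis ans = steps := by
  intro wave
  induction wave with
  | nil =>
    intro nxt vis steps fA ans _ _ _ _ hg _ _
    obtain ⟨g, hg1, _⟩ := hg
    exact absurd hg1 (List.not_mem_nil)
  | cons c rest ih =>
    intro nxt vis steps fA ans hw hn hnd hpos hg hst hfuel
    obtain ⟨hcin, hcvis⟩ := hw c (List.mem_cons_self ..)
    have hcnz : vis c.1 c.2 ≠ 0 := by rw [hcvis]; omega
    have hndc : c ∉ rest ++ nxt ∧ (rest ++ nxt).Nodup := by
      have h := hnd; rw [List.cons_append] at h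
      exact ⟨(List.nodup_cons.mp h).1, (List.nodup_cons.mp h).2⟩
    obtain ⟨f, rfl⟩ : ∃ f, fA = f + 1 := by
      refine ⟨fA - 1, ?_⟩
      have : 1 ≤ fA := le_trans (by simp [List.length_cons]; omega) hfuel
      omega
    obtain ⟨Δ, hA, hndΔ, hmem, hoff, hcov, hposF, hunv⟩ :=
      exp_full board n m c.1 c.2 hcin dirsList (rest ++ nxt) vis hcnz hpos
    have hfreshΔ : ∀ e ∈ rest ++ nxt, e ∉ Δ := by
      intro e he heΔ
      have hz := (hmem e heΔ).2.1
      rcases List.mem_append.mp he with h2 | h2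
      · obtain ⟨_, hv2⟩ := hw e (List.mem_cons_of_mem _ h2)
        rw [hv2] at hz; omega
      · obtain ⟨_, hv2⟩ := hn e h2
        rw [hv2] at hz; omega
    by_cases hGc : cellAt board c.1 c.2 = 'G'
    · rw [List.cons_append]
      simp only [loopA, expandA]
      rw [if_pos hGc, hA, hcvis]
      have hsub : steps + 1 - 1 = steps := by omega
      rw [hsub]
      apply loopA_const
      · intro e he
        have hec : e ≠ c := by
          intro he2
          subst he2
          rcases List.mem_append.mp he with he' | he'
          · exact hndc.1 he'
          · exact hcnz (hmem e he').2.1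
        rcases List.mem_append.mp he with he' | he'
        · have hi_hz : Inb n m e ∧ vis e.1 e.2 ≠ 0 := by
            rcases List.mem_append.mp he' with h2 | h2
            · obtain ⟨hi2, hv2⟩ := hw e (List.mem_cons_of_mem _ h2)
              exact ⟨hi2, by rw [hv2]; omega⟩
            · obtain ⟨hi2, hv2⟩ := hn e h2
              exact ⟨hi2, by rw [hv2]; omega⟩
          obtain ⟨hi, hz⟩ := hi_hz
          have heΔ : e ∉ Δ := fun h => hz (hmem e h).2.1
          exact ⟨hi, fun hgg => hec (huniq e c hi hcin hgg hGc),
            by rw [hoff e heΔ]; exact hz⟩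
        · obtain ⟨hi, hz0, hval, _⟩ := hmem e he'
          exact ⟨hi, fun hgg => hec (huniq e c hi hcin hgg hGc),
            by rw [hval]; omega⟩
      · exact hposF
      · intro e hi hgg
        have hec : e = c := huniq e c hi hcin hgg hGc
        subst hec
        have heΔ : e ∉ Δ := fun h => hcnz (hmem e h).2.1
        rw [hoff e heΔ]; exact hcnz
    · obtain ⟨g, hg1, hg2⟩ := hg
      have hgrest : g ∈ rest := by
        rcases List.mem_cons.mp hg1 with rfl | h
        · exact absurd hg2 hGc
        · exact h
      rw [List.cons_append]
      simp only [loopA, expandA]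
      rw [if_neg hGc, hA, List.append_assoc]
      apply ih (nxt ++ Δ) _ steps f ans
      · intro e he
        obtain ⟨hi2, hv2⟩ := hw e (List.mem_cons_of_mem _ he)
        exact ⟨hi2, by rw [hoff e (hfreshΔ e (List.mem_append.mpr (Or.inl he)))]; exact hv2⟩
      · intro e he
        rcases List.mem_append.mp he with h2 | h2
        · obtain ⟨hi2, hv2⟩ := hn e h2
          exact ⟨hi2, by
            rw [hoff e (hfreshΔ e (List.mem_append.mpr (Or.inr h2)))]; exact hv2⟩
        · obtain ⟨hi2, _, hval, _⟩ := hmem e h2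
          exact ⟨hi2, by rw [hval, hcvis]; ring⟩
      · rw [← List.append_assoc]
        exact List.Nodup.append hndc.2 hndΔ hfreshΔ
      · exact hposF
      · exact ⟨g, hgrest, hg2⟩
      · exact hst
      · have h1 : (c :: rest).length + nxt.length + unvis n m vis ≤ f + 1 := hfuel
        simp only [List.length_cons] at h1
        simp only [List.length_append]
        omega

-- one whole goal-free wave of A's queue: it becomes the fresh targets Δ of the wave
theorem waveA (board : List String) (n m : Int) :
    ∀ (wave nxt : List (Int × Int)) (vis : Int → Int → Int) (steps : Int)
      (fA : Nat) (ans : Int),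
      (∀ c ∈ wave, Inb n m c ∧ vis c.1 c.2 = steps + 1 ∧ cellAt board c.1 c.2 ≠ 'G') →
      (∀ c ∈ nxt, Inb n m c ∧ vis c.1 c.2 = steps + 2) →
      (wave ++ nxt).Nodup →
      (∀ a b : Int, 0 ≤ vis a b) →
      0 ≤ steps →
      wave.length + nxt.length + unvis n m vis ≤ fA →
      ∃ (Δ : List (Int × Int)) (vis' : Int → Int → Int),
        loopA board n m fA (wave ++ nxt) vis ans =
          loopA board n m (fA - wave.length) (nxt ++ Δ) vis' ans ∧
        (nxt ++ Δ).Nodup ∧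
        (∀ d ∈ Δ, Inb n m d ∧ vis d.1 d.2 = 0 ∧ vis' d.1 d.2 = steps + 2 ∧
          ∃ src ∈ wave, d ∈ targetsOf board n m src) ∧
        (∀ c : Int × Int, c ∉ Δ → vis' c.1 c.2 = vis c.1 c.2) ∧
        (∀ c ∈ wave, ∀ t ∈ targetsOf board n m c, vis' t.1 t.2 ≠ 0) ∧
        (∀ a b : Int, 0 ≤ vis' a b) ∧
        unvis n m vis' + Δ.length = unvis n m vis := by
  intro wave
  induction wave with
  | nil =>
    intro nxt vis steps fA ans _ _ hnd hpos _ _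
    refine ⟨[], vis, by simp, by simpa using hnd, by simp, fun c _ => rfl, by simp,
      hpos, by simp⟩
  | cons c rest ih =>
    intro nxt vis steps fA ans hw hn hnd hpos hst hfuel
    obtain ⟨hcin, hcvis, hcng⟩ := hw c (List.mem_cons_self ..)
    have hcnz : vis c.1 c.2 ≠ 0 := by rw [hcvis]; omega
    have hndc : c ∉ rest ++ nxt ∧ (rest ++ nxt).Nodup := by
      have h := hnd; rw [List.cons_append] at h
      exact ⟨(List.nodup_cons.mp h).1, (List.nodup_cons.mp h).2⟩
    obtain ⟨f, rfl⟩ : ∃ f, fA = f + 1 := by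
      refine ⟨fA - 1, ?_⟩
      have : 1 ≤ fA := le_trans (by simp [List.length_cons]; omega) hfuel
      omega
    obtain ⟨Δ₀, hA, hndΔ, hmem, hoff, hcov, hposF, hunv⟩ :=
      exp_full board n m c.1 c.2 hcin dirsList (rest ++ nxt) vis hcnz hpos
    have hfreshΔ : ∀ e ∈ rest ++ nxt, e ∉ Δ₀ := by
      intro e he heΔ
      have hz := (hmem e heΔ).2.1
      rcases List.mem_append.mp he with h2 | h2
      · obtain ⟨_, hv2, _⟩ := hw e (List.mem_cons_of_mem _ h2)
        rw [hv2] at hz; omega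
      · obtain ⟨_, hv2⟩ := hn e h2
        rw [hv2] at hz; omega
    set vis1 := (dirsList.foldl (expStepA board n m c.1 c.2) (rest ++ nxt, vis)).2 with hv1
    have hstep : loopA board n m (f + 1) ((c :: rest) ++ nxt) vis ans =
        loopA board n m f (rest ++ (nxt ++ Δ₀)) vis1 ans := by
      rw [List.cons_append]
      simp only [loopA, expandA]
      rw [if_neg hcng, hA, List.append_assoc]
    obtain ⟨Δ', vis'', heq, hnd', hmem', hoff', hcov', hpos', hunv'⟩ :=
      ih (nxt ++ Δ₀) vis1 steps f ans
        (fun e he => by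
          obtain ⟨hi2, hv2, hg2⟩ := hw e (List.mem_cons_of_mem _ he)
          exact ⟨hi2,
            by rw [hoff e (hfreshΔ e (List.mem_append.mpr (Or.inl he)))]; exact hv2, hg2⟩)
        (fun e he => by
          rcases List.mem_append.mp he with h2 | h2
          · obtain ⟨hi2, hv2⟩ := hn e h2
            exact ⟨hi2, by
              rw [hoff e (hfreshΔ e (List.mem_append.mpr (Or.inr h2)))]; exact hv2⟩
          · obtain ⟨hi2, _, hval, _⟩ := hmem e h2
            exact ⟨hi2, by rw [hval, hcvis]; ring⟩)
        (by rw [← List.append_assoc]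
            exact List.Nodup.append hndc.2 hndΔ hfreshΔ)
        hposF hst
        (by
          have h1 : (c :: rest).length + nxt.length + unvis n m vis ≤ f + 1 := hfuel
          simp only [List.length_cons] at h1
          simp only [List.length_append]
          omega)
    have hΔ₀val : ∀ d ∈ Δ₀, vis1 d.1 d.2 = steps + 2 := by
      intro d hd
      have := (hmem d hd).2.2.1
      rw [this, hcvis]; ring
    have hΔ₀notΔ' : ∀ d ∈ Δ₀, d ∉ Δ' := by
      intro d hd hd'
      have hz := (hmem' d hd').2.1
      rw [hΔ₀val d hd] at hz; omega
    refine ⟨Δ₀ ++ Δ', vis'', ?_, ?_, ?_, ?_, ?_, hpos', ?_⟩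
    · rw [hstep, heq]
      have hl : f + 1 - (c :: rest).length = f - rest.length := by
        simp [List.length_cons]
      rw [hl, ← List.append_assoc]
    · rw [← List.append_assoc]; exact hnd'
    · intro d hd
      rcases List.mem_append.mp hd with hd0 | hd'
      · obtain ⟨hi2, hz2, _, hmm⟩ := hmem d hd0
        refine ⟨hi2, hz2, ?_, ⟨c, List.mem_cons_self .., hmm⟩⟩
        rw [hoff' d (hΔ₀notΔ' d hd0), hΔ₀val d hd0]
      · obtain ⟨hi2, hz2, hval2, src, hsrc, hmm⟩ := hmem' d hd'
        have hd0 : d ∉ Δ₀ := by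
          intro h
          rw [hΔ₀val d h] at hz2; omega
        refine ⟨hi2, by rw [← hoff d hd0]; exact hz2, hval2,
          ⟨src, List.mem_cons_of_mem _ hsrc, hmm⟩⟩
    · intro e he
      have h1 : e ∉ Δ₀ := fun h => he (List.mem_append.mpr (Or.inl h))
      have h2 : e ∉ Δ' := fun h => he (List.mem_append.mpr (Or.inr h))
      rw [hoff' e h2, hoff e h1]
    · intro e he t ht
      rcases List.mem_cons.mp he with rfl | he'
      · have h1 := hcov t ht
        have htΔ' : t ∉ Δ' := by
          intro h
          exact h1 (hmem' t h).2.1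
        rw [hoff' t htΔ']
        exact h1
      · exact hcov' e he' t ht
    · rw [List.length_append]; omega

theorem roundsB_succ (board : List String) (n m : Int) (fuel : Nat)
    (S : PySem.Set (Int × Int)) (k : Int) :
    roundsB board n m (fuel + 1) S k =
      if S.any (fun c => cellAt board c.1 c.2 == 'G') then k
      else if PySem.Set.diff
          (PySem.Set.ofList (S.flatMap (fun c => targetsB board n m c.1 c.2))) S = [] then -1
      else roundsB board n m fuel
        (PySem.Set.union S (PySem.Set.diff
          (PySem.Set.ofList (S.flatMap (fun c => targetsB board n m c.1 c.2))) S)) (k + 1) := rfl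

-- the whole run: A's queue BFS equals B's closure iteration
theorem mainAB (board : List String) (n m : Int)
    (huniq : ∀ c c' : Int × Int, Inb n m c → Inb n m c' →
      cellAt board c.1 c.2 = 'G' → cellAt board c'.1 c'.2 = 'G' → c = c') :
    ∀ (fB : Nat) (wave : List (Int × Int)) (vis : Int → Int → Int)
      (S : PySem.Set (Int × Int)) (steps : Int) (fA : Nat),
      (∀ c ∈ wave, Inb n m c ∧ vis c.1 c.2 = steps + 1) →
      wave.Nodup →
      (∀ c : Int × Int, c ∈ S ↔ vis c.1 c.2 ≠ 0) →
      (∀ a b : Int, 0 ≤ vis a b) →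
      (∀ a b : Int, vis a b ≤ steps + 1) →
      (∀ c : Int × Int, vis c.1 c.2 = steps + 1 → c ∈ wave) →
      (∀ c : Int × Int, vis c.1 c.2 ≠ 0 → vis c.1 c.2 ≠ steps + 1 →
        cellAt board c.1 c.2 ≠ 'G' ∧ ∀ t ∈ targetsOf board n m c, vis t.1 t.2 ≠ 0) →
      0 ≤ steps →
      wave.length + unvis n m vis ≤ fA →
      unvis n m vis + 2 ≤ fB →
      loopA board n m fA wave vis (-1) = roundsB board n m fB S steps := by
  intro fB
  induction fB with
  | zero =>
    intro wave vis S steps fA _ _ _ _ _ _ _ _ _ hfB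
    omega
  | succ fB ih =>
    intro wave vis S steps fA hw hnd hS hpos hle hlev hinv hst hfA _
    rw [roundsB_succ]
    by_cases hg : S.any (fun c => cellAt board c.1 c.2 == 'G') = true
    · rw [if_pos hg]
      obtain ⟨g, hgS, hgG'⟩ := List.any_eq_true.mp hg
      have hgG : cellAt board g.1 g.2 = 'G' := by
        exact_mod_cast (beq_iff_eq).mp hgG'
      have hgz : vis g.1 g.2 ≠ 0 := (hS g).mp hgS
      have hgw : g ∈ wave := by
        by_cases h : vis g.1 g.2 = steps + 1
        · exact hlev g h
        · exact absurd hgG (hinv g hgz h).1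
      have := loopA_goal board n m huniq wave [] vis steps fA (-1)
        hw (fun c hc => absurd hc (List.not_mem_nil))
        (by simpa using hnd) hpos ⟨g, hgw, hgG⟩ hst (by simpa using hfA)
      simpa using this
    · rw [if_neg hg]
      have hnoG : ∀ c ∈ S, cellAt board c.1 c.2 ≠ 'G' := by
        intro c hc hG
        exact hg (List.any_eq_true.mpr ⟨c, hc, (beq_iff_eq).mpr hG⟩)
      obtain ⟨Δ, vis', heq, hndΔ, hmem, hoff, hcov, hpos', hunv⟩ :=
        waveA board n m wave [] vis steps fA (-1)
          (fun c hc => by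
            obtain ⟨hi, hv⟩ := hw c hc
            exact ⟨hi, hv, hnoG c ((hS c).mpr (by rw [hv]; omega))⟩)
          (fun c hc => absurd hc (List.not_mem_nil))
          (by simpa using hnd) hpos hst (by simpa using hfA)
      simp only [List.nil_append] at heq hndΔ
      have hmemnew : ∀ t : Int × Int,
          (t ∈ PySem.Set.diff
            (PySem.Set.ofList (S.flatMap (fun c => targetsB board n m c.1 c.2))) S)
          ↔ t ∈ Δ := by
        intro t
        rw [PySem.Set.mem_diff, PySem.Set.mem_ofList, List.mem_flatMap]
        constructor
        · rintro ⟨⟨c, hcS, ht⟩, htS⟩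
          rw [targetsB_eq] at ht
          have hcz : vis c.1 c.2 ≠ 0 := (hS c).mp hcS
          have htz : vis t.1 t.2 = 0 := by
            by_contra h
            exact htS ((hS t).mpr h)
          by_cases hc1 : vis c.1 c.2 = steps + 1
          · have hcw := hlev c hc1
            have := hcov c hcw t (by
              have : (c.1, c.2) = c := rfl
              rw [← this]; exact ht)
            by_contra htΔ
            rw [hoff t htΔ] at this
            exact this htz
          · exact absurd ((hinv c hcz hc1).2 t (by
              have : (c.1, c.2) = c := rfl
              rw [← this]; exact ht)) (by simpa using htz)
        · intro htΔ
          obtain ⟨hi, hz, _, src, hsrc, hts⟩ := hmem t htΔ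
          have hsz : vis src.1 src.2 ≠ 0 := by
            rw [(hw src hsrc).2]; omega
          refine ⟨⟨src, (hS src).mpr hsz, ?_⟩, fun h => ((hS t).mp h) hz⟩
          rw [targetsB_eq]
          have : (src.1, src.2) = src := rfl
          rw [this]
          exact hts
      by_cases hΔnil : Δ = []
      · subst hΔnil
        have hnew : PySem.Set.diff
            (PySem.Set.ofList (S.flatMap (fun c => targetsB board n m c.1 c.2))) S = [] := by
          apply List.eq_nil_iff_forall_not_mem.mpr
          intro t ht
          exact absurd ((hmemnew t).mp ht) (List.not_mem_nil)
        rw [hnew, if_pos rfl]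
        simp only [List.append_nil] at heq
        rw [heq, loopA_nil]
      · have hnew : PySem.Set.diff
            (PySem.Set.ofList (S.flatMap (fun c => targetsB board n m c.1 c.2))) S ≠ [] := by
          obtain ⟨d, hd⟩ := List.exists_mem_of_ne_nil Δ hΔnil
          intro h
          have := (hmemnew d).mpr hd
          rw [h] at this
          exact absurd this (List.not_mem_nil)
        simp only [List.append_nil] at heq
        rw [if_neg hnew, heq]
        apply ih Δ vis' _ (steps + 1) (fA - wave.length)
        · intro d hd
          obtain ⟨hi, _, hval, _⟩ := hmem d hd
          exact ⟨hi, by rw [hval]; ring⟩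
        · exact hndΔ
        · intro c
          rw [PySem.Set.mem_union, hmemnew c, hS c]
          constructor
          · rintro (hz | hΔ)
            · by_cases h : c ∈ Δ
              · rw [(hmem c h).2.2.1]; omega
              · rw [hoff c h]; exact hz
            · rw [(hmem c hΔ).2.2.1]; omega
          · intro hz
            by_cases h : c ∈ Δ
            · exact Or.inr h
            · rw [hoff c h] at hz
              exact Or.inl hz
        · exact hpos'
        · intro a b
          by_cases h : ((a, b) : Int × Int) ∈ Δ
          · have := (hmem (a, b) h).2.2.1
            simp only at this
            omega
          · have := hoff (a, b) h
            simp only at this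
            rw [this]
            have := hle a b
            omega
        · intro c hc
          by_cases h : c ∈ Δ
          · exact h
          · rw [hoff c h] at hc
            have := hle c.1 c.2
            omega
        · intro c hcz hc2
          have hcΔ : c ∉ Δ := by
            intro h
            rw [(hmem c h).2.2.1] at hc2
            exact hc2 (by ring)
          rw [hoff c hcΔ] at hcz hc2
          have hcvv : vis c.1 c.2 ≠ 0 := hcz
          constructor
          · exact hnoG c ((hS c).mpr hcvv)
          · intro t ht
            by_cases hc1 : vis c.1 c.2 = steps + 1
            · exact hcov c (hlev c hc1) t ht
            · have := (hinv c hcvv hc1).2 t ht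
              have htΔ : t ∉ Δ := fun h => this (hmem t h).2.1
              rw [hoff t htΔ]
              exact this
        · omega
        · have hl : Δ.length ≥ 1 := by
            cases Δ with
            | nil => exact absurd rfl hΔnil
            | cons _ _ => simp
          omega
        · have hl : Δ.length ≥ 1 := by
            cases Δ with
            | nil => exact absurd rfl hΔnil
            | cons _ _ => simp
          omega

-- characterisation of A's start marking
theorem vis0_eq (L : List (Int × Int)) :
    ∀ (v : Int → Int → Int) (a b : Int),
      (L.foldl (fun v c => updV v c.1 c.2 1) v) a b = if (a, b) ∈ L then 1 else v a b := by
  induction L with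
  | nil => intro v a b; simp
  | cons d t ih =>
    intro v a b
    rw [List.foldl_cons, ih]
    by_cases ht : (a, b) ∈ t
    · rw [if_pos ht, if_pos (List.mem_cons_of_mem _ ht)]
    · rw [if_neg ht]
      by_cases hd : (a, b) = d
      · rw [if_pos (by rw [hd]; exact List.mem_cons_self ..)]
        unfold updV
        rw [if_pos ⟨congrArg Prod.fst hd, congrArg Prod.snd hd⟩]
      · rw [if_neg (by intro h; rcases List.mem_cons.mp h with h' | h'; exact hd h'; exact ht h')]
        unfold updV
        rw [if_neg (by rintro ⟨e1, e2⟩; exact hd (Prod.ext e1 e2))]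

theorem startCells_mem (board : List String) (c : Int × Int) (hc : c ∈ startCells board) :
    ∃ i j : Nat, i < board.length ∧ j < (board.getD i "").toList.length ∧
      c = ((i : Int), (j : Int)) := by
  unfold startCells at hc
  rw [List.mem_flatMap] at hc
  obtain ⟨i, hi, hc2⟩ := hc
  rw [List.mem_filterMap] at hc2
  obtain ⟨j, hj, hc3⟩ := hc2
  rw [List.mem_range] at hi
  rw [List.mem_range] at hj
  by_cases hr : (board.getD i "").toList.getD j ' ' = 'R'
  · rw [if_pos hr] at hc3
    exact ⟨i, j, hi, hj, (Option.some.inj hc3).symm⟩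
  · rw [if_neg hr] at hc3
    cases hc3

theorem startCells_row (board : List String) (i : Nat) (b : Int × Int)
    (hb : b ∈ (List.range (board.getD i "").toList.length).filterMap (fun j =>
      if (board.getD i "").toList.getD j ' ' = 'R' then some ((i : Int), (j : Int)) else none)) :
    b.1 = (i : Int) := by
  rw [List.mem_filterMap] at hb
  obtain ⟨j, _, h3⟩ := hb
  by_cases hr : (board.getD i "").toList.getD j ' ' = 'R'
  · rw [if_pos hr] at h3
    rw [← Option.some.inj h3]
  · rw [if_neg hr] at h3
    cases h3

theorem startCells_nodup (board : List String) : (startCells board).Nodup := by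
  unfold startCells
  rw [List.nodup_flatMap]
  constructor
  · intro i _
    apply List.Nodup.filterMap
    · intro a a' b hb hb'
      rw [Option.mem_def] at hb hb'
      by_cases h1 : (board.getD i "").toList.getD a ' ' = 'R'
      · by_cases h2 : (board.getD i "").toList.getD a' ' ' = 'R'
        · rw [if_pos h1] at hb
          rw [if_pos h2] at hb'
          have hba := Option.some.inj hb
          have hba' := Option.some.inj hb'
          have he := congrArg Prod.snd (hba.trans hba'.symm)
          simp only [] at he
          exact_mod_cast he
        · rw [if_neg h2] at hb'; cases hb'
      · rw [if_neg h1] at hb; cases hb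
    · exact List.nodup_range
  · have hp : (List.range board.length).Pairwise (· ≠ ·) := List.nodup_range
    refine hp.imp ?_
    intro i i' hne b hbi hbi'
    have e1 := startCells_row board i b hbi
    have e2 := startCells_row board i' b hbi'
    have : (i : Int) = (i' : Int) := e1.symm.trans e2
    exact hne (by exact_mod_cast this)

theorem startCells_nil (board : List String) (h : ∀ r ∈ board, 'R' ∉ r.toList) :
    startCells board = [] := by
  unfold startCells
  rw [List.flatMap_eq_nil_iff]
  intro i hi
  rw [List.filterMap_eq_nil_iff]
  intro j hj
  rw [List.mem_range] at hi hj
  have hmem : (board.getD i "").toList.getD j ' ' ∈ (board.getD i "").toList := by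
    rw [List.getD_eq_getElem _ _ hj]
    exact List.getElem_mem hj
  have hrow : board.getD i "" ∈ board := by
    rw [List.getD_eq_getElem _ _ hi]
    exact List.getElem_mem hi
  rw [if_neg (fun he => h _ hrow (by rw [← he]; exact hmem))]

theorem unvis_mark (n m : Int) :
    ∀ (L : List (Int × Int)) (v : Int → Int → Int), L.Nodup →
      (∀ c ∈ L, Inb n m c ∧ v c.1 c.2 = 0) →
      unvis n m (L.foldl (fun v c => updV v c.1 c.2 1) v) + L.length = unvis n m v := by
  intro L
  induction L with
  | nil => intro v _ _; simp
  | cons d t ih =>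
    intro v hnd hf
    obtain ⟨hdin, hdz⟩ := hf d (List.mem_cons_self ..)
    have hupd : unvis n m (updV v d.1 d.2 1) + 1 = unvis n m v :=
      unvis_upd n m v d.1 d.2 1 hdin hdz one_ne_zero
    rw [List.foldl_cons]
    have hrec := ih (updV v d.1 d.2 1) (List.nodup_cons.mp hnd).2 ?_
    · rw [List.length_cons]; omega
    · intro e he
      obtain ⟨hein, hez⟩ := hf e (List.mem_cons_of_mem _ he)
      refine ⟨hein, ?_⟩
      have hne : ¬(e.1 = d.1 ∧ e.2 = d.2) := by
        rintro ⟨e1, e2⟩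
        exact (List.nodup_cons.mp hnd).1 (by rw [← Prod.ext e1 e2]; exact he)
      unfold updV
      rw [if_neg hne]
      exact hez

theorem unvis_zero (n m : Int) : unvis n m (fun _ _ => 0) = n.toNat * m.toNat := by
  unfold unvis
  rw [Finset.filter_true_of_mem (fun _ _ => rfl), Finset.card_product,
    Finset.card_range, Finset.card_range]

theorem count_le_one_unique (l : List Char) (ch : Char) :
    l.count ch ≤ 1 → ∀ j j' : Nat, j < l.length → j' < l.length →
      l.getD j ' ' = ch → l.getD j' ' ' = ch → j = j' := by
  induction l with
  | nil => intro _ j j' hj _ _ _; simp at hj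
  | cons x t ih =>
    intro h j j' hj hj' e e'
    have hc : (x :: t).count ch = t.count ch + if x == ch then 1 else 0 := List.count_cons
    cases j with
    | zero =>
      cases j' with
      | zero => rfl
      | succ k' =>
        exfalso
        rw [List.getD_cons_zero] at e
        rw [List.getD_cons_succ] at e'
        have hk' : k' < t.length := by simpa using hj'
        have hmem : ch ∈ t := by
          rw [List.getD_eq_getElem _ _ hk'] at e'
          exact e' ▸ List.getElem_mem hk'
        have := List.count_pos_iff.mpr hmem
        rw [hc, if_pos (beq_iff_eq.mpr e)] at h
        omega
    | succ k =>
      cases j' with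
      | zero =>
        exfalso
        rw [List.getD_cons_zero] at e'
        rw [List.getD_cons_succ] at e
        have hk : k < t.length := by simpa using hj
        have hmem : ch ∈ t := by
          rw [List.getD_eq_getElem _ _ hk] at e
          exact e ▸ List.getElem_mem hk
        have := List.count_pos_iff.mpr hmem
        rw [hc, if_pos (beq_iff_eq.mpr e')] at h
        omega
      | succ k' =>
        rw [List.getD_cons_succ] at e e'
        have hk : k < t.length := by simpa using hj
        have hk' : k' < t.length := by simpa using hj'
        have ht : t.count ch ≤ 1 := by rw [hc] at h; split_ifs at h <;> omega
        rw [ih ht k k' hk hk' e e']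

theorem two_indices_sum (l : List Nat) :
    ∀ i i' : Nat, i < l.length → i' < l.length → i ≠ i' →
      1 ≤ l.getD i 0 → 1 ≤ l.getD i' 0 → 2 ≤ l.sum := by
  induction l with
  | nil => intro i _ hi _ _ _ _; simp at hi
  | cons x t ih =>
    intro i i' hi hi' hne h1 h1'
    rw [List.sum_cons]
    cases i with
    | zero =>
      cases i' with
      | zero => exact absurd rfl hne
      | succ k' =>
        rw [List.getD_cons_zero] at h1
        rw [List.getD_cons_succ] at h1'
        have hk' : k' < t.length := by simpa using hi'
        have hle : t.getD k' 0 ≤ t.sum := by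
          have hmem : t.getD k' 0 ∈ t := by
            rw [List.getD_eq_getElem _ _ hk']; exact List.getElem_mem hk'
          exact List.single_le_sum (fun y _ => Nat.zero_le y) _ hmem
        omega
    | succ k =>
      cases i' with
      | zero =>
        rw [List.getD_cons_zero] at h1'
        rw [List.getD_cons_succ] at h1
        have hk : k < t.length := by simpa using hi
        have hle : t.getD k 0 ≤ t.sum := by
          have hmem : t.getD k 0 ∈ t := by
            rw [List.getD_eq_getElem _ _ hk]; exact List.getElem_mem hk
          exact List.single_le_sum (fun y _ => Nat.zero_le y) _ hmem
        omega
      | succ k' =>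
        rw [List.getD_cons_succ] at h1 h1'
        have hk : k < t.length := by simpa using hi
        have hk' : k' < t.length := by simpa using hi'
        have := ih k k' hk hk' (fun h => hne (by rw [h])) h1 h1'
        omega

theorem g_unique (board : List String)
    (hwid : ∀ r ∈ board, r.toList.length = (board.headD "").toList.length)
    (hsum : (board.map (fun r => r.toList.count 'G')).sum ≤ 1) :
    ∀ c c' : Int × Int,
      Inb (board.length : Int) ((board.headD "").toList.length : Int) c →
      Inb (board.length : Int) ((board.headD "").toList.length : Int) c' →
      cellAt board c.1 c.2 = 'G' → cellAt board c'.1 c'.2 = 'G' → c = c' := by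
  intro c c' hc hc' hg hg'
  obtain ⟨h1, h2, h3, h4⟩ := hc
  obtain ⟨h1', h2', h3', h4'⟩ := hc'
  have hrow : ∀ k : Nat, k < board.length → (board.getD k "").toList.length =
      (board.headD "").toList.length := by
    intro k hk
    refine hwid _ ?_
    rw [List.getD_eq_getElem _ _ hk]
    exact List.getElem_mem hk
  have hiN : c.1.toNat < board.length := by omega
  have hiN' : c'.1.toNat < board.length := by omega
  have hjW : c.2.toNat < (board.getD c.1.toNat "").toList.length := by
    rw [hrow _ hiN]; omega
  have hjW' : c'.2.toNat < (board.getD c'.1.toNat "").toList.length := by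
    rw [hrow _ hiN']; omega
  have hcnt : ∀ k : Nat, k < board.length →
      (board.map (fun r => r.toList.count 'G')).getD k 0 =
        (board.getD k "").toList.count 'G' := by
    intro k hk
    rw [List.getD_eq_getElem _ _ (by simpa using hk), List.getElem_map,
      List.getD_eq_getElem _ _ hk]
  have hG : (board.getD c.1.toNat "").toList.getD c.2.toNat ' ' = 'G' := hg
  have hG' : (board.getD c'.1.toNat "").toList.getD c'.2.toNat ' ' = 'G' := hg'
  by_cases hii : c.1.toNat = c'.1.toNat
  · have hle : (board.getD c.1.toNat "").toList.count 'G' ≤ 1 := by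
      have hmem : (board.map (fun r => r.toList.count 'G')).getD c.1.toNat 0 ∈
          board.map (fun r => r.toList.count 'G') := by
        rw [List.getD_eq_getElem _ _ (by simpa using hiN)]
        exact List.getElem_mem (by simpa using hiN)
      have hss := List.single_le_sum (l := board.map (fun r => r.toList.count 'G'))
        (fun y _ => Nat.zero_le y) _ hmem
      have := hcnt c.1.toNat hiN
      omega
    rw [← hii] at hG' hjW'
    have hjj : c.2.toNat = c'.2.toNat :=
      count_le_one_unique _ 'G' hle _ _ hjW hjW' hG hG'
    have e1 : c.1 = c'.1 := by omega
    have e2 : c.2 = c'.2 := by omega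
    exact Prod.ext e1 e2
  · exfalso
    have hp1 : 1 ≤ (board.map (fun r => r.toList.count 'G')).getD c.1.toNat 0 := by
      rw [hcnt _ hiN]
      have hmem : 'G' ∈ (board.getD c.1.toNat "").toList := by
        rw [List.getD_eq_getElem _ _ hjW] at hG
        exact hG ▸ List.getElem_mem hjW
      exact List.count_pos_iff.mpr hmem
    have hp2 : 1 ≤ (board.map (fun r => r.toList.count 'G')).getD c'.1.toNat 0 := by
      rw [hcnt _ hiN']
      have hmem : 'G' ∈ (board.getD c'.1.toNat "").toList := by
        rw [List.getD_eq_getElem _ _ hjW'] at hG'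
        exact hG' ▸ List.getElem_mem hjW'
      exact List.count_pos_iff.mpr hmem
    have := two_indices_sum (board.map (fun r => r.toList.count 'G'))
      c.1.toNat c'.1.toNat (by simpa using hiN) (by simpa using hiN') hii hp1 hp2
    omega

theorem roundsB_empty (board : List String) (n m : Int) (fuel : Nat) (steps : Int) :
    roundsB board n m (fuel + 1) [] steps = -1 := by
  simp [roundsB, PySem.Set.diff, PySem.Set.ofList]

-- ===== VERDICT (by name: the statement is the Claim_ definition above) =====
theorem solution_spec : Claim_equal_solution := by
  unfold Claim_equal_solution
  intro board _ hpre
  unfold Spec_solution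
  obtain ⟨hne, hcase⟩ := hpre
  show solution board = solution_alt board
  show loopA board (board.length : Int) ((board.headD "").toList.length : Int)
      (((board.length : Int)).toNat * (((board.headD "").toList.length : Int)).toNat + 1)
      (startCells board)
      ((startCells board).foldl (fun v c => updV v c.1 c.2 1) (fun _ _ => (0 : Int))) (-1)
    = roundsB board (board.length : Int) ((board.headD "").toList.length : Int)
      (((board.length : Int)).toNat * (((board.headD "").toList.length : Int)).toNat + 2)
      (PySem.Set.ofList (startCells board)) 0
  rcases hcase with ⟨hwid, hg⟩ | hnoR
  · have hInb : ∀ c ∈ startCells board,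
        Inb (board.length : Int) ((board.headD "").toList.length : Int) c := by
      intro c hc
      obtain ⟨i, j, hi, hj, rfl⟩ := startCells_mem board c hc
      have hwrow : (board.getD i "").toList.length = (board.headD "").toList.length :=
        hwid _ (by rw [List.getD_eq_getElem _ _ hi]; exact List.getElem_mem hi)
      refine ⟨Int.natCast_nonneg i, ?_, Int.natCast_nonneg j, ?_⟩
      · show (i : Int) < (board.length : Int)
        exact_mod_cast hi
      · show (j : Int) < ((board.headD "").toList.length : Int)
        rw [← hwrow]
        exact_mod_cast hj
    have hmk := unvis_mark (board.length : Int) ((board.headD "").toList.length : Int)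
      (startCells board) (fun _ _ => 0) (startCells_nodup board)
      (fun c hc => ⟨hInb c hc, rfl⟩)
    have hz := unvis_zero (board.length : Int) ((board.headD "").toList.length : Int)
    have e1 : ((board.length : Int)).toNat = board.length := by omega
    have e2 : (((board.headD "").toList.length : Int)).toNat =
        (board.headD "").toList.length := by omega
    refine mainAB board _ _ (g_unique board hwid hg) _ (startCells board) _ _ 0 _
      ?_ (startCells_nodup board) ?_ ?_ ?_ ?_ ?_ (by norm_num) ?_ ?_
    · intro c hc
      refine ⟨hInb c hc, ?_⟩
      rw [vis0_eq]
      split_ifs with h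
      · norm_num
      · exact absurd hc h
    · intro c
      rw [PySem.Set.mem_ofList, vis0_eq]
      split_ifs with h
      · exact iff_of_true h one_ne_zero
      · exact iff_of_false h (by norm_num)
    · intro a b
      rw [vis0_eq]
      split_ifs <;> norm_num
    · intro a b
      rw [vis0_eq]
      split_ifs <;> norm_num
    · intro c hc
      rw [vis0_eq] at hc
      by_contra h
      rw [if_neg (by
        intro h2
        have : (c.1, c.2) = c := rfl
        rw [this] at h2
        exact h h2)] at hc
      norm_num at hc
    · intro c hcz hc1
      exfalso
      rw [vis0_eq] at hcz hc1
      split_ifs at hcz hc1 with h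
      · exact hc1 (by norm_num)
      · exact hcz rfl
    · rw [e1, e2] at hz
      rw [e1, e2]
      omega
    · rw [e1, e2] at hz
      rw [e1, e2]
      omega
  · rw [startCells_nil board hnoR, loopA_nil]
    rw [show PySem.Set.ofList ([] : List (Int × Int)) = [] from rfl]
    rw [roundsB_empty]
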